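-- pv_equiv track=rewrite | github.com/eliottcassidy2000/math | 04-computation/iso_class_graph_fast.py | canonical_form
-- ===== SOURCE A (Python) =====
-- from itertools import combinations, permutations
--
-- def canonical_form(A, n):
--     best = None
--     for perm in permutations(range(n)):
--         form = []
--         for i in range(n):
--             for j in range(i+1, n):
--                 form.append(A[perm[i]][perm[j]])
--         form = tuple(form)
--         if best is None or form < best:
--             best = form
--     return best
-- ===== SOURCE B (Python) =====
-- def canonical_form(A, n):
--     # Branch-and-bound DFS over permutation prefixes: the first len(prefix)-1
--     # entries of any completion's vector are A[prefix[0]][u] for u in prefix[1:],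
--     # so a prefix whose row-0 block already exceeds best can be pruned wholesale.
--     def form_of(perm):
--         return tuple(A[perm[i]][perm[j]] for i in range(n) for j in range(i + 1, n))
--
--     def dfs(prefix, rest, best):
--         if not rest:
--             f = form_of(prefix)
--             return f if best is None or f < best else best
--         for idx in range(len(rest)):
--             v = rest[idx]
--             if best is not None and prefix:
--                 e = tuple(A[prefix[0]][u] for u in prefix[1:]) + (A[prefix[0]][v],)
--                 if e > best[:len(e)]:
--                     continue  # every completion of prefix+[v] is > best
--             best = dfs(prefix + [v], rest[:idx] + rest[idx + 1:], best)
--         return best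
--
--     return dfs([], list(range(n)), None)
-- ===== Notes on version B (the rewrite author's own statement) =====
-- stated objective: alternative
-- what changed: A enumerates all n! permutations and compares each full adjacency vector against the best; B runs a branch-and-bound DFS over permutation prefixes, pruning an entire subtree (all its completions at once) as soon as the prefix's row-0 block already exceeds the current best.
import Mathlib
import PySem

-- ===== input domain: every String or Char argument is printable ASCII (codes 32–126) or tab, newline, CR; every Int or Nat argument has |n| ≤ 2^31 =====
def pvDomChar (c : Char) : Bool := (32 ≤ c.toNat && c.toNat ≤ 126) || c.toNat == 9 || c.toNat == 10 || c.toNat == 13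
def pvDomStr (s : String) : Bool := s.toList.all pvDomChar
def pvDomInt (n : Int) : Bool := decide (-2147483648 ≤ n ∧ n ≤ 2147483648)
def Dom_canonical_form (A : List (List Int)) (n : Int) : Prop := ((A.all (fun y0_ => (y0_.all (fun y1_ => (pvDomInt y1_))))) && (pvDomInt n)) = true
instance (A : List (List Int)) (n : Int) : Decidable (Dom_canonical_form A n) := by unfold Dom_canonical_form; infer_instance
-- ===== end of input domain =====

-- B replaces A's exhaustive scan of all n! adjacency vectors by a branch-and-bound DFS over
-- permutation prefixes that prunes whole subtrees whose row-0 block already exceeds the best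
-- (objective: alternative algorithm; equivalence of the RETURN value is what is proved).

-- ===== PORT A =====
-- A[x][y] for vertex numbers x, y (in range under Pre_)
def pvAt (A : List (List Int)) (x y : Int) : Int :=
  PySem.List.pyGetD (PySem.List.pyGetD A x []) y 0

-- A[perm[i]][perm[j]] for positions i, j
def pvVal (A : List (List Int)) (perm : List Int) (i j : Int) : Int :=
  pvAt A (PySem.List.pyGetD perm i 0) (PySem.List.pyGetD perm j 0)

-- Python tuple '<' on int tuples
def pvLexLt : List Int → List Int → Bool
  | _, [] => false
  | [], _ :: _ => true
  | a :: as, b :: bs => decide (a < b) || (decide (a = b) && pvLexLt as bs)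

-- A's nested 'for i … for j … form.append(A[perm[i]][perm[j]])' loops
def pvFormA (A : List (List Int)) (n : Int) (perm : List Int) : List Int :=
  (PySem.List.pyRange 0 n 1).foldl (fun form i =>
    (PySem.List.pyRange (i + 1) n 1).foldl (fun form j => form ++ [pvVal A perm i j]) form) []

def canonical_form (A : List (List Int)) (n : Int) : List Int :=
  ((PySem.List.permutations (PySem.List.pyRange 0 n 1) (PySem.List.pyRange 0 n 1).length).foldl
    (fun best perm =>
      let form := pvFormA A n perm
      match best with
      | none => some form
      | some b => if pvLexLt form b then some form else some b)
    none).getD []  -- best is never None in Python (permutations is nonempty); getD covers the unreachable case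

-- ===== PORT B =====
-- B's form_of(perm): the same generator expression, written as the comprehension it is
def pvFormB (A : List (List Int)) (n : Int) (perm : List Int) : List Int :=
  (PySem.List.pyRange 0 n 1).flatMap (fun i =>
    (PySem.List.pyRange (i + 1) n 1).map (fun j => pvVal A perm i j))

-- B's leaf update: 'f if best is None or f < best else best'
def pvStepB (best : Option (List Int)) (f : List Int) : Option (List Int) :=
  match best with
  | none => some f
  | some b => if pvLexLt f b then some f else some b

-- e = tuple(A[prefix[0]][u] for u in prefix[1:]) + (A[prefix[0]][v],)  (prefix = p0 :: ps)
def pvE (A : List (List Int)) (p0 : Int) (ps : List Int) (v : Int) : List Int :=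
  ps.map (fun u => pvAt A p0 u) ++ [pvAt A p0 v]

-- B's dfs; the Nat fuel is rest.length at every real call (termination device only):
-- Python's 'if not rest' leaf is the fuel-0 case, the loop over idx is the fold over range(len(rest))
def pvDfs (A : List (List Int)) (n : Int) : Nat → List Int → List Int → Option (List Int) → Option (List Int)
  | 0, pre, _, best => pvStepB best (pvFormB A n pre)
  | r + 1, pre, rest, best =>
      (List.range rest.length).foldl (fun b idx =>
        match rest[idx]? with
        | none => b  -- unreachable: idx < len(rest)
        | some v =>
          let skip : Bool :=
            match b, pre with
            | some bb, p0 :: ps => pvLexLt (bb.take (ps.length + 1)) (pvE A p0 ps v)  -- e > best[:len(e)]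
            | _, _ => false
          if skip then b else pvDfs A n r (pre ++ [v]) (rest.eraseIdx idx) b) best

def canonical_form_alt (A : List (List Int)) (n : Int) : List Int :=
  (pvDfs A n (PySem.List.pyRange 0 n 1).length [] (PySem.List.pyRange 0 n 1) none).getD []
  -- dfs never returns None in Python; getD covers the unreachable case

-- ===== PRECONDITION & SPEC =====
-- Exactly the inputs where Python A returns (no IndexError): for n ≥ 2 the first n rows exist,
-- rows 0..n-2 need all columns 0..n-1, the last row only columns 0..n-2 (row index ≠ column index).
def Pre_canonical_form (A : List (List Int)) (n : Int) : Prop :=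
  2 ≤ n → (n ≤ (A.length : Int) ∧
    ∀ k < n.toNat, (if (k : Int) = n - 1 then n - 1 else n) ≤ ((A.getD k []).length : Int))
instance (A : List (List Int)) (n : Int) : Decidable (Pre_canonical_form A n) := by
  unfold Pre_canonical_form; infer_instance

def pvWitness_canonical_form : List (List Int) × Int := ([[0, 1], [1, 0]], 2)

def Spec_canonical_form (A : List (List Int)) (n : Int) (out : List Int) : Prop := out = canonical_form_alt A n
instance (A : List (List Int)) (n : Int) (out : List Int) : Decidable (Spec_canonical_form A n out) := by
  unfold Spec_canonical_form; infer_instance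

-- ===== CLAIM (what is proved, stated in full; the proofs are below) =====
def Claim_equal_canonical_form : Prop := ∀ (A : List (List Int)) (n : Int), Dom_canonical_form A n → Pre_canonical_form A n → Spec_canonical_form A n (canonical_form A n)

-- ===== LEMMAS AND PROOFS =====

-- A's nested append loops and B's comprehension build the same vector
def pvPairs (n : Int) : List (Int × Int) :=
  (PySem.List.pyRange 0 n 1).flatMap (fun i => (PySem.List.pyRange (i + 1) n 1).map (fun j => (i, j)))

theorem pvFormA_eq (A : List (List Int)) (n : Int) (perm : List Int) :
    pvFormA A n perm = (pvPairs n).map (fun p => pvVal A perm p.1 p.2) := by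
  simp only [pvFormA, pvPairs, PySem.List.foldl_append_singleton_eq_map,
    PySem.List.foldl_append_eq_flatMap, List.nil_append, List.map_flatMap, List.map_map,
    Function.comp_def]

theorem pvFormB_eq (A : List (List Int)) (n : Int) (perm : List Int) :
    pvFormB A n perm = pvFormA A n perm := by
  simp only [pvFormB, pvFormA_eq, pvPairs, List.map_flatMap, List.map_map, Function.comp_def]

theorem length_pyRange0 (n : Int) :
    (PySem.List.pyRange 0 n 1).length = if 0 < n then n.toNat else 0 := by
  simp only [PySem.List.pyRange]
  split_ifs with h0 h1 h2 <;> simp_all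

-- a fold whose step fixes the accumulator on every element is the identity
theorem foldl_fixed_mem {α β : Type} (f : β → α → β) (b : β) (l : List α)
    (h : ∀ x ∈ l, f b x = b) : l.foldl f b = b := by
  induction l with
  | nil => rfl
  | cons x xs ih =>
    simp only [List.foldl_cons, h x (List.mem_cons_self)]
    exact ih (fun y hy => h y (List.mem_cons_of_mem x hy))

-- Python '>' against a prefix of best decides the whole comparison:
-- best[:k] < f[:k] (strict) forces not (f < best)
theorem lexLt_false_of_gt_take :
    ∀ (k : Nat) (f b : List Int), pvLexLt (b.take k) (f.take k) = true →
      (f.take k).length = k → pvLexLt f b = false := by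
  intro k
  induction k with
  | zero => intro f b h _; simp [pvLexLt] at h
  | succ k ih =>
    intro f b h hl
    cases f with
    | nil => simp at hl
    | cons x f' =>
      cases b with
      | nil => simp [pvLexLt]
      | cons y b' =>
        simp only [List.take_succ_cons, pvLexLt, Bool.or_eq_true, Bool.and_eq_true,
          decide_eq_true_eq] at h ⊢
        simp only [List.take_succ_cons, List.length_cons, Nat.succ.injEq] at hl
        rcases h with h | ⟨hey, hrec⟩
        · have h1 : ¬ x < y := by omega
          have h2 : x ≠ y := by omega
          simp [h1, h2]
        · have h1 : ¬ x < y := by omega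
          simp [h1, ih f' b' hrec hl]

-- row 0 of the permutation p0 :: t read back from the index form: the tail of map_pyGetD_pyRange_zero
theorem map_getD_tail (n p0 : Int) (t : List Int)
    (hlen : (((p0 :: t).length : Nat) : Int) = n) :
    (PySem.List.pyRange 1 n 1).map (fun j => PySem.List.pyGetD (p0 :: t) j 0) = t := by
  have h0 : (0 : Int) < n := by simp at hlen; omega
  have hmain := PySem.List.map_pyGetD_pyRange_zero (p0 :: t) 0
  rw [show PySem.List.len (p0 :: t) = n from by simpa [PySem.List.len] using hlen] at hmain
  rw [PySem.List.pyRange_one_cons h0] at hmain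
  simp only [List.map_cons, zero_add] at hmain
  exact (List.cons.injEq _ _ _ _ ▸ hmain).2

-- the first k entries of the vector of a full permutation p0 :: t are row 0 against t
theorem take_form (A : List (List Int)) (n : Int) (p0 : Int) (t : List Int) (k : Nat)
    (hk : k ≤ t.length) (hlen : (((p0 :: t).length : Nat) : Int) = n) :
    (pvFormA A n (p0 :: t)).take k = (t.take k).map (pvAt A p0) := by
  have h0 : (0 : Int) < n := by simp at hlen; omega
  have hhead : PySem.List.pyGetD (p0 :: t) (0 : Int) 0 = p0 :=
    PySem.List.pyGetD_ofNat' (p0 :: t) 0 0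
  have htail := map_getD_tail n p0 t hlen
  rw [pvFormA_eq, pvPairs, PySem.List.pyRange_one_cons h0, List.flatMap_cons, List.map_append,
    List.map_map]
  have hblock : ((PySem.List.pyRange (0 + 1) n 1).map
      ((fun p => pvVal A (p0 :: t) p.1 p.2) ∘ fun j => ((0 : Int), j))) = t.map (pvAt A p0) := by
    have h2 : ((PySem.List.pyRange 1 n 1).map (fun j => PySem.List.pyGetD (p0 :: t) j 0)).map
        (pvAt A p0) = t.map (pvAt A p0) := by rw [htail]
    rw [List.map_map] at h2
    rw [← h2]
    simp only [Function.comp_def, pvVal, hhead, zero_add]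
  rw [hblock, List.take_append]
  have hz : k - (t.map (pvAt A p0)).length = 0 := by simp; omega
  rw [hz]
  simp [List.map_take]

-- q ∈ permutations xs (len xs) has the length of xs
theorem length_of_mem_permutations {α : Type} {xs q : List α}
    (h : q ∈ PySem.List.permutations xs xs.length) : q.length = xs.length :=
  (PySem.List.perm_of_mem_permutations h).length_eq

-- MAIN: the pruned DFS folds the leaf update over exactly A's permutation list
theorem pvDfs_eq (A : List (List Int)) (n : Int) :
    ∀ (r : Nat) (rest pre : List Int) (best : Option (List Int)),
      rest.length = r →
      pre.length + rest.length = (PySem.List.pyRange 0 n 1).length →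
      pvDfs A n r pre rest best =
        (PySem.List.permutations rest r).foldl
          (fun b q => pvStepB b (pvFormB A n (pre ++ q))) best := by
  intro r
  induction r with
  | zero =>
    intro rest pre best hr _
    have hnil : rest = [] := List.eq_nil_of_length_eq_zero hr
    subst hnil
    show pvStepB best (pvFormB A n pre) = _
    simp [PySem.List.permutations]
  | succ r ih =>
    intro rest pre best hr hN
    show (List.range rest.length).foldl _ best = _
    rw [PySem.List.permutations.eq_2, List.foldl_flatMap]
    apply PySem.List.foldl_congr_mem
    intro b i hi
    have hilt : i < rest.length := List.mem_range.mp hi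
    have hv : rest[i]? = some rest[i] := List.getElem?_eq_getElem hilt
    have hrem : (rest.eraseIdx i).length = r := by
      simp [List.length_eraseIdx, hilt]; omega
    have hrecall : ∀ (b' : Option (List Int)),
        pvDfs A n r (pre ++ [rest[i]]) (rest.eraseIdx i) b' =
          ((PySem.List.permutations (rest.eraseIdx i) r).map (fun p => rest[i] :: p)).foldl
            (fun b q => pvStepB b (pvFormB A n (pre ++ q))) b' := by
      intro b'
      rw [ih (rest.eraseIdx i) (pre ++ [rest[i]]) b' hrem
        (by simp only [List.length_append, List.length_cons, List.length_nil]; omega)]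
      rw [List.foldl_map]
      apply PySem.List.foldl_congr_mem
      intro acc q _
      simp
    rcases b with _ | bb
    · -- best is None: no prune possible
      cases pre <;> · simp only [hv]
                      exact hrecall none
    · cases hp : pre with
      | nil =>
        rw [hp] at hrecall
        simp only [hv]
        exact hrecall (some bb)
      | cons p0 ps =>
        rw [hp] at hrecall
        by_cases hsk : pvLexLt (bb.take (ps.length + 1)) (pvE A p0 ps rest[i]) = true
        · -- prune: every completion of this prefix compares above best, the subtree is a no-op
          simp only [hv, hsk, if_true]
          rw [List.foldl_map]
          refine (foldl_fixed_mem _ _ _ ?_).symm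
          intro q hq
          have hql : q.length = r := by
            have := length_of_mem_permutations (xs := rest.eraseIdx i) (hrem ▸ hq)
            omega
          have hform := take_form A n p0 (ps ++ rest[i] :: q) (ps.length + 1)
            (by simp only [List.length_append, List.length_cons]; omega)
            (by
              have hlen1 : (p0 :: (ps ++ rest[i] :: q)).length = pre.length + rest.length := by
                simp [hp]; omega
              have hpos : 0 < pre.length + rest.length := by simp [hp]
              rw [hN, length_pyRange0] at hpos
              rw [hlen1, hN, length_pyRange0]
              split_ifs at hpos ⊢ <;> omega)
          have htk : (ps ++ rest[i] :: q).take (ps.length + 1) = ps ++ [rest[i]] := by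
            rw [List.take_append]
            simp
          rw [htk, show (ps ++ [rest[i]]).map (pvAt A p0) = pvE A p0 ps rest[i] from by simp [pvE]]
            at hform
          have hfalse : pvLexLt (pvFormA A n (p0 :: (ps ++ rest[i] :: q))) bb = false := by
            apply lexLt_false_of_gt_take (ps.length + 1)
            · rw [hform]; exact hsk
            · rw [hform]; simp [pvE]
          simp only [List.cons_append, pvFormB_eq] at *
          simp [pvStepB, hfalse]
        · -- no prune: recurse via the induction hypothesis
          simp only [Bool.not_eq_true] at hsk
          simp only [hv, hsk, Bool.false_eq_true, if_false]
          simpa using hrecall (some bb)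

-- ===== VERDICT (by name: the statement is the Claim_ definition above) =====
theorem canonical_form_spec : Claim_equal_canonical_form := by
  intro A n _ _
  unfold Spec_canonical_form canonical_form canonical_form_alt
  rw [pvDfs_eq A n (PySem.List.pyRange 0 n 1).length (PySem.List.pyRange 0 n 1) [] none rfl (by simp)]
  congr 1
  apply PySem.List.foldl_congr_mem
  intro b q _
  cases b <;> simp [pvStepB, pvFormB_eq]
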